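-- pv_equiv track=rewrite | github.com/DuhanMo/Python-algorithm | programmers/기능개발.py | solution
-- ===== SOURCE A (Python) =====
-- import math
-- from collections import deque
--
-- def solution(progresses, speeds):
--     answer = []
--     # 전처리
--     remain = [100 - x for x in progresses]
--     for i in range(len(remain)):
--         remain[i] = math.ceil(remain[i] / speeds[i])
--     remain = deque(remain)
--
--     max_num = remain.popleft()
--     answer.append(1)
--     while remain:
--         if remain[0] > max_num:
--             answer.append(1)
--             max_num = remain.popleft()
--         else:
--             answer[-1] += 1
--             remain.popleft()
--
--     return answer
-- ===== SOURCE B (Python) =====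
-- import math
--
-- def solution(progresses, speeds):
--     days = [math.ceil((100 - p) / s) for p, s in zip(progresses, speeds)]
--     leader = days[0]
--     bounds = [0]
--     for i, d in enumerate(days[1:], 1):
--         if d > leader:
--             bounds.append(i)
--             leader = d
--     bounds.append(len(days))
--     return [b2 - b1 for b1, b2 in zip(bounds, bounds[1:])]
-- ===== Notes on version B (the rewrite author's own statement) =====
-- stated objective: alternative
-- what changed: A pops a deque and increments the count of the current group in-place as it scans; B first collects the boundary indices where a deadline exceeds the current group leader and then returns the differences of adjacent boundaries.
import Mathlib
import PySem

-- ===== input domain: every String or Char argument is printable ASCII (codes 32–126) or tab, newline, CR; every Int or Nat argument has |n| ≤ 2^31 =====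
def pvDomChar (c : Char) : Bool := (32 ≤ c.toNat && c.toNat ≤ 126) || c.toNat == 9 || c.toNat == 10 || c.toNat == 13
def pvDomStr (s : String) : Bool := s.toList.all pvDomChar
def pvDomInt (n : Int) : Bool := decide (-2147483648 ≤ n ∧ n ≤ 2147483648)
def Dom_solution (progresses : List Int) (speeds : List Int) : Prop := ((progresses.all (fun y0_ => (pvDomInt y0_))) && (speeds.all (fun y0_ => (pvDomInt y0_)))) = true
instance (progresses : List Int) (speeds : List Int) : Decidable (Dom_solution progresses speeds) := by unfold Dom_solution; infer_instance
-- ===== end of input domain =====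

-- B replaces A's interleaved deque pop-and-count with a boundary-index pass followed by
-- difference arithmetic (objective: alternative decomposition, same cost).

-- math.ceil(r / s) for s ≠ 0; exact on the domain |r|,|s| ≤ 2^31+100 (float error < 1/|s|)
def ceilDiv (r s : Int) : Int := -(PySem.Int.floordiv (-r) s)

-- ===== PORT A =====
-- the while loop over the deque: state = (remaining deque, max_num, answer in reverse)
def solLoop : List Int → Int → List Int → List Int
  | [], _, ans => ans
  | d :: rest, maxNum, ans =>
    if d > maxNum then solLoop rest d (1 :: ans)
    else solLoop rest maxNum (match ans with | a :: t => (a + 1) :: t | [] => [])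

def solution (progresses : List Int) (speeds : List Int) : List Int :=
  match (List.range (progresses.map (fun x => (100 : Int) - x)).length).map
    (fun (i : Nat) => ceilDiv (PySem.List.pyGetD (progresses.map (fun x => (100 : Int) - x)) (Int.ofNat i) 0)
      (PySem.List.pyGetD speeds (Int.ofNat i) 0)) with
  | [] => []  -- Python raises IndexError here (popleft on empty); excluded by Pre_
  | m :: rest => (solLoop rest m [1]).reverse

-- ===== PORT B =====
-- the comprehension [b2 - b1 for b1, b2 in zip(bounds, bounds[1:])]
def pvDiffs (l : List Int) : List Int := (l.zip (l.drop 1)).map (fun p => p.2 - p.1)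

-- the for loop over enumerate(days[1:], 1): state = (i, leader, bounds in reverse)
def bLoop : List Int → Int → Int → List Int → List Int
  | [], _, _, bs => bs
  | d :: ds, i, leader, bs =>
    if d > leader then bLoop ds (i + 1) d (i :: bs)
    else bLoop ds (i + 1) leader bs

def solution_alt (progresses : List Int) (speeds : List Int) : List Int :=
  match (progresses.zip speeds).map (fun ps => ceilDiv (100 - ps.1) ps.2) with
  | [] => []  -- Python raises IndexError here (days[0]); excluded by Pre_
  | d0 :: rest =>
    pvDiffs ((bLoop rest 1 d0 [0]).reverse ++ [((rest.length : Int) + 1)])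

-- ===== PRECONDITION & SPEC =====
-- Pre_ excludes exactly the inputs where A raises: empty progresses (popleft of empty deque),
-- speeds shorter than progresses (IndexError), or a zero speed in use (ZeroDivisionError).
def Pre_solution (progresses : List Int) (speeds : List Int) : Prop :=
  progresses ≠ [] ∧ progresses.length ≤ speeds.length ∧
    ∀ s ∈ speeds.take progresses.length, s ≠ 0
instance (progresses : List Int) (speeds : List Int) : Decidable (Pre_solution progresses speeds) := by
  unfold Pre_solution; infer_instance

def pvWitness_solution : List Int × List Int := ([93, 30, 55], [1, 30, 5])

def Spec_solution (progresses : List Int) (speeds : List Int) (out : List Int) : Prop := out = solution_alt progresses speeds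
instance (progresses : List Int) (speeds : List Int) (out : List Int) : Decidable (Spec_solution progresses speeds out) := by unfold Spec_solution; infer_instance

-- ===== CLAIM (what is proved, stated in full; the proofs are below) =====
def Claim_equal_solution : Prop := ∀ (progresses : List Int) (speeds : List Int), Dom_solution progresses speeds → Pre_solution progresses speeds → Spec_solution progresses speeds (solution progresses speeds)

-- ===== LEMMAS AND PROOFS =====

-- canonical grouping: m = current group's leader deadline, k = its count so far
def gspec (m k : Int) : List Int → List Int
  | [] => [k]
  | d :: ds => if d > m then k :: gspec d 1 ds else gspec m (k + 1) ds

theorem solLoop_eq_gspec (ds : List Int) : ∀ (m k : Int) (acc : List Int),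
    solLoop ds m (k :: acc) = (gspec m k ds).reverse ++ acc := by
  induction ds with
  | nil => intro m k acc; simp [solLoop, gspec]
  | cons d ds ih =>
    intro m k acc
    by_cases h : d > m
    · simp [solLoop, gspec, h, ih]
    · simp [solLoop, gspec, h, ih]

theorem bLoop_append (ds : List Int) : ∀ (i m : Int) (bs : List Int),
    bLoop ds i m bs = bLoop ds i m [] ++ bs := by
  induction ds with
  | nil => intro i m bs; simp [bLoop]
  | cons d ds ih =>
    intro i m bs
    by_cases h : d > m
    · simp only [bLoop, if_pos h]
      rw [ih _ _ (i :: bs), ih _ _ [i]]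
      simp
    · simp only [bLoop, if_neg h]
      rw [ih _ _ bs]

theorem pvDiffs_cons2 (a b : Int) (r : List Int) :
    pvDiffs (a :: b :: r) = (b - a) :: pvDiffs (b :: r) := by
  simp [pvDiffs]

theorem bLoop_diffs (ds : List Int) : ∀ (i m b : Int),
    pvDiffs (b :: ((bLoop ds i m []).reverse ++ [i + (ds.length : Int)])) = gspec m (i - b) ds := by
  induction ds with
  | nil => intro i m b; simp [bLoop, pvDiffs, gspec]
  | cons d ds ih =>
    intro i m b
    by_cases h : d > m
    · simp only [bLoop, if_pos h]
      rw [bLoop_append ds (i + 1) d [i]]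
      have hlen : i + ((d :: ds).length : Int) = (i + 1) + (ds.length : Int) := by
        simp; ring
      rw [hlen]
      simp only [List.reverse_append, List.reverse_cons, List.reverse_nil,
        List.nil_append, List.cons_append]
      rw [pvDiffs_cons2]
      rw [ih (i + 1) d i]
      simp [gspec, h]
    · simp only [bLoop, if_neg h]
      have hlen : i + ((d :: ds).length : Int) = (i + 1) + (ds.length : Int) := by
        simp; ring
      rw [hlen, ih (i + 1) m b]
      simp only [gspec, if_neg h]
      congr 1
      ring

theorem A_eval (m : Int) (rest : List Int) :
    (solLoop rest m [1]).reverse = gspec m 1 rest := by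
  rw [solLoop_eq_gspec rest m 1 []]
  simp

theorem B_eval (m : Int) (rest : List Int) :
    pvDiffs ((bLoop rest 1 m [0]).reverse ++ [((rest.length : Int) + 1)]) = gspec m 1 rest := by
  rw [bLoop_append rest 1 m [0]]
  have h := bLoop_diffs rest 1 m 0
  simp only [List.reverse_append, List.reverse_cons, List.reverse_nil, List.nil_append,
    List.cons_append] at h ⊢
  have : (1 : Int) + (rest.length : Int) = (rest.length : Int) + 1 := by ring
  rw [← this]
  simpa using h

theorem days_eq (p s : List Int) (h : p.length ≤ s.length) :
    (List.range (p.map (fun x => (100 : Int) - x)).length).map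
      (fun (i : Nat) => ceilDiv (PySem.List.pyGetD (p.map (fun x => (100 : Int) - x)) (Int.ofNat i) 0)
                        (PySem.List.pyGetD s (Int.ofNat i) 0))
    = (p.zip s).map (fun ps => ceilDiv (100 - ps.1) ps.2) := by
  apply List.ext_getElem
  · simp; omega
  · intro i h1 h2
    have hip : i < p.length := by simpa using h1
    have his : i < s.length := by omega
    simp only [List.getElem_map, List.getElem_range, List.getElem_zip]
    simp only [Int.ofNat_eq_natCast, PySem.List.pyGetD_natCast]
    rw [List.getD_eq_getElem _ _ (by simpa using hip), List.getD_eq_getElem _ _ his]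
    simp

-- ===== VERDICT (by name: the statement is the Claim_ definition above) =====
theorem solution_spec : Claim_equal_solution := by
  intro p s _ hpre
  obtain ⟨hne, hlen, _⟩ := hpre
  unfold Spec_solution solution solution_alt
  rw [days_eq p s hlen]
  have hp : 0 < p.length := List.length_pos_iff.mpr hne
  have hs : s ≠ [] := by
    intro h0
    rw [h0] at hlen
    simp at hlen
    exact hne hlen
  have hzne : (p.zip s).map (fun ps => ceilDiv (100 - ps.1) ps.2) ≠ [] := by
    simp [List.zip_eq_nil_iff, hne, hs]
  obtain ⟨d0, rest, hd⟩ := List.exists_cons_of_ne_nil hzne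
  rw [hd]
  simp only
  rw [A_eval, B_eval]
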